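-- pv_equiv track=rewrite | github.com/MrBrantCode/unitest_baseline | mut_generate/mist_train_cf/cf_69313/solution.py | find_shares
-- ===== SOURCE A (Python) =====
-- def find_shares(total_value, dividend_returns):
--     for A in range(total_value // 100 + 1):
--         for B in range(total_value // 100 + 1):
--             for C in range(total_value // 100 + 1):
--                 D = total_value // 100 - A - B - C
--                 if D >= 0 and A * 3 + B * 5 + C * 7 + D * 9 == dividend_returns:
--                     return A * 100, B * 100, C * 100, D * 100
--     return None
-- ===== SOURCE B (Python) =====
-- def find_shares(total_value, dividend_returns):
--     n = total_value // 100
--     for A in range(n + 1):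
--         for B in range(n + 1):
--             # 3A+5B+7C+9D = R with D = n-A-B-C  <=>  2C = 9n-6A-4B-R
--             t = 9 * n - 6 * A - 4 * B - dividend_returns
--             if t >= 0 and t % 2 == 0:
--                 C = t // 2
--                 D = n - A - B - C
--                 if C <= n and D >= 0:
--                     return A * 100, B * 100, C * 100, D * 100
--     return None
-- ===== Notes on version B (the rewrite author's own statement) =====
-- stated objective: faster
-- what changed: B drops A's innermost brute-force loop over C by solving the linear share equation for C in closed form (2C = 9n - 6A - 4B - R), iterating only over A and B.
import Mathlib
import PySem

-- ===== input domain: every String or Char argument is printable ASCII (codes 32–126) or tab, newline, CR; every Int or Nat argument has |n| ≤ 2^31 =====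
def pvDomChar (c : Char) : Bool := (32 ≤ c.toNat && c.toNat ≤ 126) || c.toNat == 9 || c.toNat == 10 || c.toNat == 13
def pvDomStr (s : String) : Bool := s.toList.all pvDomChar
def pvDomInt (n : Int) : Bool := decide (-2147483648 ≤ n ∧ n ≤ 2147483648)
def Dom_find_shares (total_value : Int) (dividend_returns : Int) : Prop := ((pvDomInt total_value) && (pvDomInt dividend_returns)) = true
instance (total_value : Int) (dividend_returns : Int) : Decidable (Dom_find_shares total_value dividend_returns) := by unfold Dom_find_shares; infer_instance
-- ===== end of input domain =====

-- B replaces A's innermost brute-force loop over C by solving the linear equation for C directly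
-- (2C = 9n - 6A - 4B - R), turning O(n^3) into O(n^2); same return value everywhere (objective: faster).

-- ===== PORT A =====
-- Literal port of A: triple nested loop, first hit returned (findSome? = early return).
def find_shares (total_value : Int) (dividend_returns : Int) : Option (List Int) :=
  (PySem.List.pyRange 0 (PySem.Int.floordiv total_value 100 + 1) 1).findSome? (fun A =>
    (PySem.List.pyRange 0 (PySem.Int.floordiv total_value 100 + 1) 1).findSome? (fun B =>
      (PySem.List.pyRange 0 (PySem.Int.floordiv total_value 100 + 1) 1).findSome? (fun C =>
        let D := PySem.Int.floordiv total_value 100 - A - B - C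
        if D ≥ 0 ∧ A * 3 + B * 5 + C * 7 + D * 9 = dividend_returns then
          some [A * 100, B * 100, C * 100, D * 100]
        else none)))

-- ===== PORT B =====
-- Literal port of Source B: two loops; C computed in closed form from the dividend equation.
def find_shares_alt (total_value : Int) (dividend_returns : Int) : Option (List Int) :=
  let n := PySem.Int.floordiv total_value 100
  (PySem.List.pyRange 0 (n + 1) 1).findSome? (fun A =>
    (PySem.List.pyRange 0 (n + 1) 1).findSome? (fun B =>
      let t := 9 * n - 6 * A - 4 * B - dividend_returns
      if t ≥ 0 ∧ PySem.Int.mod t 2 = 0 then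
        let C := PySem.Int.floordiv t 2
        let D := n - A - B - C
        if C ≤ n ∧ D ≥ 0 then some [A * 100, B * 100, C * 100, D * 100] else none
      else none))

-- ===== PRECONDITION & SPEC =====
def Spec_find_shares (total_value : Int) (dividend_returns : Int) (out : Option (List Int)) : Prop := out = find_shares_alt total_value dividend_returns
instance (total_value : Int) (dividend_returns : Int) (out : Option (List Int)) : Decidable (Spec_find_shares total_value dividend_returns out) := by unfold Spec_find_shares; infer_instance

-- ===== CLAIM (what is proved, stated in full; the proofs are below) =====
def Claim_equal_find_shares : Prop := ∀ (total_value : Int) (dividend_returns : Int), Dom_find_shares total_value dividend_returns → Spec_find_shares total_value dividend_returns (find_shares total_value dividend_returns)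

-- ===== LEMMAS AND PROOFS =====

-- findSome? of a function with at most one live argument c₀ is a membership test on c₀.
theorem pv_findSome?_unique {β : Type} (f : Int → Option β) (c₀ : Int)
    (h : ∀ x, f x ≠ none → x = c₀) (L : List Int) :
    L.findSome? f = if c₀ ∈ L then f c₀ else none := by
  induction L with
  | nil => simp
  | cons a L ih =>
    rw [List.findSome?_cons]
    cases hfa : f a with
    | some v =>
      have ha : a = c₀ := h a (by simp [hfa])
      subst ha
      simp [hfa]
    | none =>
      rw [ih]
      by_cases hc : c₀ ∈ L
      · simp [hc]
      · by_cases hca : c₀ = a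
        · subst hca; simp [hc, hfa]
        · simp [hc, hca]

-- The inner C-loop of A equals B's closed-form computation of C, for every n, A, B.
theorem pv_inner_eq (n A B d : Int) :
    (PySem.List.pyRange 0 (n + 1) 1).findSome? (fun C =>
        let D := n - A - B - C
        if D ≥ 0 ∧ A * 3 + B * 5 + C * 7 + D * 9 = d then
          some [A * 100, B * 100, C * 100, D * 100]
        else none)
    = (let t := 9 * n - 6 * A - 4 * B - d
       if t ≥ 0 ∧ PySem.Int.mod t 2 = 0 then
         let C := PySem.Int.floordiv t 2
         let D := n - A - B - C
         if C ≤ n ∧ D ≥ 0 then some [A * 100, B * 100, C * 100, D * 100] else none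
       else none) := by
  have hq := PySem.Int.floordiv_mul_add_mod (9 * n - 6 * A - 4 * B - d) 2
  have hr0 := PySem.Int.mod_nonneg (9 * n - 6 * A - 4 * B - d) (b := 2) (by omega)
  have hr2 := PySem.Int.mod_lt (9 * n - 6 * A - 4 * B - d) (b := 2) (by omega)
  rw [pv_findSome?_unique _ (PySem.Int.floordiv (9 * n - 6 * A - 4 * B - d) 2)
        (by intro x hx
            simp only at hx
            split_ifs at hx with hPx
            · omega
            · exact absurd rfl hx)]
  simp only [PySem.List.mem_pyRange_one]
  split_ifs <;> first | rfl | omega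

-- ===== VERDICT (by name: the statement is the Claim_ definition above) =====
theorem find_shares_spec : Claim_equal_find_shares := by
  intro total_value dividend_returns _
  unfold Spec_find_shares find_shares find_shares_alt
  congr 1
  funext A
  congr 1
  funext B
  exact pv_inner_eq (PySem.Int.floordiv total_value 100) A B dividend_returns
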